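-- pv_equiv track=rewrite | github.com/tomasld13/TP-Programacion-Py | funcionesVACIAS.py | Puntos
-- ===== SOURCE A (Python) =====
-- def Puntos(candidata):
--     vocal="aeiou"
--     consonanteDificil="jkqwxyz"
--     puntaje=0
--     for elemento in candidata:
--         if elemento in vocal:
--             puntaje+=1
--         elif elemento in consonanteDificil:
--             puntaje+=5
--         else:
--             puntaje+=2
--     return puntaje
-- ===== SOURCE B (Python) =====
-- def Puntos(candidata):
--     vocales = sum(1 for c in candidata if c in "aeiou")
--     dificiles = sum(1 for c in candidata if c in "jkqwxyz")
--     return 2 * len(candidata) - vocales + 3 * dificiles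
-- ===== Notes on version B (the rewrite author's own statement) =====
-- stated objective: simpler
-- what changed: Replaces the branch-and-accumulate loop with two category counts combined in the closed form 2*len - vowels + 3*hard.
import Mathlib
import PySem

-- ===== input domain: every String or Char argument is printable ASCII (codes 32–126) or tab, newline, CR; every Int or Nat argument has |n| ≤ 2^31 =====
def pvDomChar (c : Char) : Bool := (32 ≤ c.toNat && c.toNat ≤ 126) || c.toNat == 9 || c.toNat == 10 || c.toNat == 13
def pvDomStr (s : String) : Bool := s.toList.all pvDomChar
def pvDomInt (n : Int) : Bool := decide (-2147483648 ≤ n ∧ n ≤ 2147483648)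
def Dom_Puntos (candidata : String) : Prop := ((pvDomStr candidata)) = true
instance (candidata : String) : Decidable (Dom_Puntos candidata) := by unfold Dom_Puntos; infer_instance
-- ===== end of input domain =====

-- B replaces A's branch-and-accumulate loop with two category counts and the closed form 2*len - vowels + 3*hard (simpler decomposition).


-- ===== PORT A =====
-- literal transliteration: fold over the characters, adding 1/5/2 per branch
def Puntos (candidata : String) : Int :=
  candidata.toList.foldl
    (fun puntaje elemento =>
      if elemento ∈ "aeiou".toList then puntaje + 1
      else if elemento ∈ "jkqwxyz".toList then puntaje + 5
      else puntaje + 2) 0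

-- ===== PORT B =====
-- two counting passes, then the closed form 2*len - vowels + 3*hard
def Puntos_alt (candidata : String) : Int :=
  let vocales : Int := ((candidata.toList.filter (fun c => c ∈ "aeiou".toList)).length : Int)
  let dificiles : Int := ((candidata.toList.filter (fun c => c ∈ "jkqwxyz".toList)).length : Int)
  2 * (candidata.toList.length : Int) - vocales + 3 * dificiles

-- ===== PRECONDITION & SPEC =====
def Spec_Puntos (candidata : String) (out : Int) : Prop := out = Puntos_alt candidata
instance (candidata : String) (out : Int) : Decidable (Spec_Puntos candidata out) := by unfold Spec_Puntos; infer_instance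

-- ===== CLAIM (what is proved, stated in full; the proofs are below) =====
def Claim_equal_Puntos : Prop := ∀ (candidata : String), Dom_Puntos candidata → Spec_Puntos candidata (Puntos candidata)

-- ===== LEMMAS AND PROOFS =====
theorem puntos_fold_eq (l : List Char) (acc : Int) :
    l.foldl
      (fun puntaje elemento =>
        if elemento ∈ "aeiou".toList then puntaje + 1
        else if elemento ∈ "jkqwxyz".toList then puntaje + 5
        else puntaje + 2) acc
    = acc + 2 * (l.length : Int)
        - ((l.filter (fun c => c ∈ "aeiou".toList)).length : Int)
        + 3 * ((l.filter (fun c => c ∈ "jkqwxyz".toList)).length : Int) := by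
  induction l generalizing acc with
  | nil => simp
  | cons c cs ih =>
    simp only [List.foldl_cons, List.filter_cons, List.length_cons]
    by_cases hv : c ∈ "aeiou".toList
    · have hd : c ∉ "jkqwxyz".toList := by
        fin_cases hv <;> decide
      rw [if_pos hv, ih]
      simp only [hv, hd, decide_true, decide_false, if_true, if_false, List.length_cons]
      push_cast
      ring
    · by_cases hd : c ∈ "jkqwxyz".toList
      · rw [if_neg hv, if_pos hd, ih]
        simp only [hv, hd, decide_true, decide_false, if_true, if_false, List.length_cons]
        push_cast
        ring
      · rw [if_neg hv, if_neg hd, ih]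
        simp only [hv, hd, decide_true, decide_false, if_true, if_false]
        push_cast
        ring

-- ===== VERDICT (by name: the statement is the Claim_ definition above) =====
theorem Puntos_spec : Claim_equal_Puntos := by
  intro s _
  unfold Spec_Puntos Puntos Puntos_alt
  rw [puntos_fold_eq]
  ring
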